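-- pv_equiv track=rewrite | github.com/StigLidu/DualDistill | math_utils/utils.py | parse_boxed
-- ===== SOURCE A (Python) =====
-- def parse_boxed(text, reverse=False):
--     """
--     Returns a list of all the contents inside \\boxed{...} in `text`,
--     handling nested braces to a reasonable extent.
--     """
--     results = []
--     search_start = 0
--     marker = r'\boxed{'
--
--     while True:
--         # Look for the next occurrence of \boxed{
--         start_index = text.find(marker, search_start)
--         if start_index == -1:
--             # No more \boxed{ found
--             break
--
--         # The position right after '\boxed{'
--         brace_start = start_index + len(marker)
--
--         # Use a stack to find the matching '}'
--         brace_count = 1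
--         pos = brace_start
--
--         while pos < len(text) and brace_count > 0:
--             if text[pos] == '{':
--                 brace_count += 1
--             elif text[pos] == '}':
--                 brace_count -= 1
--             pos += 1
--
--         # If brace_count == 0, 'pos-1' is where the matching '}' was found
--         if brace_count == 0:
--             content = text[brace_start : pos - 1]
--             results.append(content)
--             # Continue searching after this boxed content
--             search_start = pos
--         else:
--             # We reached the end of the text without finding a matching brace
--             break
--     if len(results) == 0:
--         return "No Answer"
--     if not reverse:
--         return results[0]
--     else:
--         return results[-1]
-- ===== SOURCE B (Python) =====
-- def parse_boxed(text, reverse=False):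
--     """Single-pass scanner: one index + brace-depth counter instead of
--     repeated find() calls with an inner brace loop."""
--     results = []
--     marker = r'\boxed{'
--     i = 0
--     depth = 0
--     start = 0
--     n = len(text)
--     while i < n:
--         if depth == 0:
--             if text.startswith(marker, i):
--                 i += len(marker)
--                 start = i
--                 depth = 1
--             else:
--                 i += 1
--         else:
--             c = text[i]
--             if c == '{':
--                 depth += 1
--             elif c == '}':
--                 depth -= 1
--                 if depth == 0:
--                     results.append(text[start:i])
--             i += 1
--     if not results:
--         return "No Answer"
--     return results[-1] if reverse else results[0]
-- ===== Notes on version B (the rewrite author's own statement) =====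
-- stated objective: simpler
-- what changed: Replaced A's outer find()-loop with a nested brace-counting loop by a single-pass scanner that walks the text once with an index and a brace-depth counter, detecting the marker only at depth 0.
import Mathlib
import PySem

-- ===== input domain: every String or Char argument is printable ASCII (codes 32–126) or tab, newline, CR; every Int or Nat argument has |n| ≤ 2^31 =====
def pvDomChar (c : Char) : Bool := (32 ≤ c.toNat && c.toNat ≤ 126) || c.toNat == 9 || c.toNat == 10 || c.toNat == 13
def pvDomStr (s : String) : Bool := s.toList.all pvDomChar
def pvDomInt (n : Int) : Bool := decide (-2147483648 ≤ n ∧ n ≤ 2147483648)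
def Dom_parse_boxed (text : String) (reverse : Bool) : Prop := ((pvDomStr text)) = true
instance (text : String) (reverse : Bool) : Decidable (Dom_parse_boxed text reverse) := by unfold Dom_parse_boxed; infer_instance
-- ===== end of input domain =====

-- B replaces A's repeated find()+inner brace loop by one single-pass scanner with a
-- brace-depth counter (objective: simpler); return values proved equal on all inputs.

-- ===== PORT A =====
-- the literal r'\boxed{'
def pvMarker : List Char := ['\\', 'b', 'o', 'x', 'e', 'd', '{']

-- A's inner while loop: returns the final (pos, brace_count)
def pvBraceLoop (s : List Char) (pos cnt : Nat) : Nat × Nat :=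
  if h : pos < s.length ∧ 0 < cnt then
    pvBraceLoop s (pos + 1)
      (if s[pos]'h.1 = '{' then cnt + 1 else if s[pos]'h.1 = '}' then cnt - 1 else cnt)
  else (pos, cnt)
termination_by s.length - pos
decreasing_by
  exact Nat.sub_lt_sub_left h.1 (Nat.lt_add_of_pos_right (by decide))

-- termination facts cited by the outer loop's decreasing proof
theorem pvBraceLoop_ge (s : List Char) (pos cnt : Nat) : pos ≤ (pvBraceLoop s pos cnt).1 := by
  fun_induction pvBraceLoop s pos cnt with
  | case1 pos cnt h ih => exact le_trans (Nat.le_succ pos) ih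
  | case2 pos cnt h => exact le_refl _

theorem pvBraceLoop_le (s : List Char) (pos cnt : Nat) (hp : pos ≤ s.length) :
    (pvBraceLoop s pos cnt).1 ≤ s.length := by
  fun_induction pvBraceLoop s pos cnt with
  | case1 pos cnt h ih => exact ih h.1
  | case2 pos cnt h => exact hp

-- start past len(s) gives find = -1 (CPython slice-bound clamping); needed to rule the case out
theorem pvFindFrom_gt (s sub : List Char) (k : Nat) (h : s.length < k) :
    PySem.Chars.findFrom s sub (k : Int) none = -1 := by
  simp only [PySem.Chars.findFrom]
  have : ((s.length : Int) < (k : Int)) := by exact_mod_cast h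
  simp only [if_neg (by omega : ¬ ((k : Int) < 0))]
  rw [if_pos]
  omega

-- decreasing measure fact for the outer loop (named so the fixpoint term stays small)
theorem pvLoopA_dec (s : List Char) (searchStart : Nat)
    (hne : PySem.Chars.findFrom s pvMarker (searchStart : Int) none ≠ -1) :
    s.length - (pvBraceLoop s ((PySem.Chars.findFrom s pvMarker (searchStart : Int) none).toNat + 7) 1).1
      < s.length - searchStart := by
  have hss : searchStart ≤ s.length := by
    by_contra hgt
    exact hne (pvFindFrom_gt s pvMarker searchStart (by omega))
  obtain ⟨h1, h2, -⟩ := PySem.Chars.findFrom_natCast_spec s pvMarker searchStart hss hne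
  have hj : searchStart ≤ (PySem.Chars.findFrom s pvMarker (searchStart : Int) none).toNat := by
    omega
  have h7 : pvMarker.length ≤ s.length - (PySem.Chars.findFrom s pvMarker (searchStart : Int) none).toNat := by
    simpa using h2.length_le
  have hm : pvMarker.length = 7 := rfl
  have hge := pvBraceLoop_ge s ((PySem.Chars.findFrom s pvMarker (searchStart : Int) none).toNat + 7) 1
  have hle := pvBraceLoop_le s ((PySem.Chars.findFrom s pvMarker (searchStart : Int) none).toNat + 7) 1 (by omega)
  omega

-- A's outer while True loop over search_start
def pvLoopA (s : List Char) (searchStart : Nat) (acc : List (List Char)) : List (List Char) :=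
  let idx := PySem.Chars.findFrom s pvMarker (searchStart : Int) none
  if hidx : idx = -1 then acc
  else
    let braceStart := idx.toNat + 7
    let r := pvBraceLoop s braceStart 1
    if r.2 = 0 then
      pvLoopA s r.1
        (acc ++ [PySem.List.slice s (some (braceStart : Int)) (some ((r.1 - 1 : Nat) : Int))])
    else acc
termination_by s.length - searchStart
decreasing_by
  exact pvLoopA_dec s searchStart hidx

-- transliteration of A: collect all boxes, then results[0] / results[-1] (guarded by non-emptiness)
def parse_boxed (text : String) (reverse : Bool) : String :=
  let results := pvLoopA text.toList 0 []
  if results = [] then "No Answer"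
  else if reverse = false then String.ofList (results.headD [])
  else String.ofList (results.getLastD [])

-- ===== PORT B =====
-- B's single while loop: index i, brace depth, content start, results accumulator
def pvScanB (s : List Char) (i depth start : Nat) (acc : List (List Char)) : List (List Char) :=
  if h : i < s.length then
    if depth = 0 then
      -- text.startswith(marker, i) with i < len(text): exact as prefix of the drop
      if PySem.Chars.startswith (s.drop i) pvMarker then
        pvScanB s (i + 7) 1 (i + 7) acc
      else pvScanB s (i + 1) 0 start acc
    else
      if s[i]'h = '{' then pvScanB s (i + 1) (depth + 1) start acc
      else if s[i]'h = '}' then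
        if depth = 1 then
          pvScanB s (i + 1) 0 start
            (acc ++ [PySem.List.slice s (some (start : Int)) (some (i : Int))])
        else pvScanB s (i + 1) (depth - 1) start acc
      else pvScanB s (i + 1) depth start acc
  else acc
termination_by s.length - i
decreasing_by
  all_goals exact Nat.sub_lt_sub_left h (Nat.lt_add_of_pos_right (by decide))

def parse_boxed_alt (text : String) (reverse : Bool) : String :=
  let results := pvScanB text.toList 0 0 0 []
  if results = [] then "No Answer"
  else if reverse then String.ofList (results.getLastD [])
  else String.ofList (results.headD [])

-- ===== PRECONDITION & SPEC =====
def Spec_parse_boxed (text : String) (reverse : Bool) (out : String) : Prop := out = parse_boxed_alt text reverse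
instance (text : String) (reverse : Bool) (out : String) : Decidable (Spec_parse_boxed text reverse out) := by unfold Spec_parse_boxed; infer_instance

-- ===== CLAIM (what is proved, stated in full; the proofs are below) =====
def Claim_equal_parse_boxed : Prop := ∀ (text : String) (reverse : Bool), Dom_parse_boxed text reverse → Spec_parse_boxed text reverse (parse_boxed text reverse)

-- ===== LEMMAS AND PROOFS =====

-- an infix is a prefix of some drop
theorem pvInfix_iff (l t : List Char) : l <:+: t ↔ ∃ k, l <+: t.drop k := by
  constructor
  · rintro ⟨pre, suf, rfl⟩
    exact ⟨pre.length, by simp⟩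
  · rintro ⟨k, hp⟩
    exact hp.isInfix.trans (List.drop_suffix k t).isInfix

-- first index ≥ i at which pvMarker occurs (proof-side characterisation of find)
def pvFirst (s : List Char) (i : Nat) : Option Nat :=
  if pvMarker.isPrefixOf (s.drop i) then some i
  else if h : i < s.length then pvFirst s (i + 1) else none
termination_by s.length - i

theorem pvFirst_spec_some (s : List Char) (i j : Nat) (h : pvFirst s i = some j) :
    i ≤ j ∧ pvMarker <+: s.drop j ∧ ∀ k, i ≤ k → k < j → ¬ pvMarker <+: s.drop k := by
  fun_induction pvFirst s i generalizing j with
  | case1 i hpre =>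
    simp only [Option.some.injEq] at h
    subst h
    exact ⟨le_refl _, List.isPrefixOf_iff_prefix.mp hpre, fun k hk1 hk2 => absurd hk1 (by omega)⟩
  | case2 i hpre hlt ih =>
    obtain ⟨h1, h2, h3⟩ := ih _ h
    refine ⟨by omega, h2, fun k hk1 hk2 => ?_⟩
    rcases Nat.eq_or_lt_of_le hk1 with rfl | hk
    · exact fun hc => hpre (List.isPrefixOf_iff_prefix.mpr hc)
    · exact h3 k hk hk2
  | case3 i hpre hge => simp at h

theorem pvFirst_spec_none (s : List Char) (i : Nat) (h : pvFirst s i = none) :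
    ∀ k, i ≤ k → ¬ pvMarker <+: s.drop k := by
  fun_induction pvFirst s i with
  | case1 i hpre => simp at h
  | case2 i hpre hlt ih =>
    intro k hk1
    rcases Nat.eq_or_lt_of_le hk1 with rfl | hk
    · exact fun hc => hpre (List.isPrefixOf_iff_prefix.mpr hc)
    · exact ih h k hk
  | case3 i hpre hge =>
    intro k hk1 hc
    have h7 : pvMarker.length ≤ (s.drop k).length := hc.length_le
    simp only [List.length_drop] at h7
    have : pvMarker.length = 7 := rfl
    omega

theorem pvFindFrom_eq_first (s : List Char) (i : Nat) (hi : i ≤ s.length) :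
    PySem.Chars.findFrom s pvMarker (i : Int) none =
      (match pvFirst s i with | none => -1 | some j => (j : Int)) := by
  cases hF : pvFirst s i with
  | none =>
    simp only []
    rw [PySem.Chars.findFrom_natCast_eq_neg_one_iff s pvMarker i hi]
    intro hinf
    obtain ⟨k, hk⟩ := pvInfix_iff pvMarker (s.drop i) |>.mp hinf
    rw [List.drop_drop] at hk
    exact pvFirst_spec_none s i hF (i + k) (by omega) hk
  | some j =>
    simp only []
    obtain ⟨hij, hpre, hmin⟩ := pvFirst_spec_some s i j hF
    have hinf : pvMarker <:+: s.drop i := by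
      refine (pvInfix_iff pvMarker (s.drop i)).mpr ⟨j - i, ?_⟩
      rw [List.drop_drop]
      have : i + (j - i) = j := by omega
      rw [this]
      exact hpre
    have hne : PySem.Chars.findFrom s pvMarker (i : Int) none ≠ -1 := by
      intro hc
      exact (PySem.Chars.findFrom_natCast_eq_neg_one_iff s pvMarker i hi |>.mp hc) hinf
    obtain ⟨hge, hpreF, hminF⟩ := PySem.Chars.findFrom_natCast_spec s pvMarker i hi hne
    have h0 : (0 : Int) ≤ PySem.Chars.findFrom s pvMarker (i : Int) none := by omega
    have hmj : (PySem.Chars.findFrom s pvMarker (i : Int) none).toNat = j := by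
      by_contra hne2
      rcases Nat.lt_or_ge (PySem.Chars.findFrom s pvMarker (i : Int) none).toNat j with hlt | hge2
      · exact hmin _ (by omega) hlt hpreF
      · exact hminF j hij (by omega) hpre
    omega

theorem pvScanB_depth0 (s : List Char) (i start : Nat) (acc : List (List Char)) :
    pvScanB s i 0 start acc =
      (match pvFirst s i with
       | none => acc
       | some j => pvScanB s (j + 7) 1 (j + 7) acc) := by
  fun_induction pvFirst s i with
  | case1 i hpre =>
    have h7 : pvMarker.length ≤ (s.drop i).length := (List.isPrefixOf_iff_prefix.mp hpre).length_le
    simp only [List.length_drop] at h7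
    have hm : pvMarker.length = 7 := rfl
    have hl : i < s.length := by omega
    rw [pvScanB]
    simp [hl, show PySem.Chars.startswith (s.drop i) pvMarker = true from hpre]
  | case2 i hpre hlt ih =>
    rw [pvScanB]
    simp only [dif_pos hlt]
    rw [if_neg (show ¬ PySem.Chars.startswith (s.drop i) pvMarker = true from hpre)]
    exact ih
  | case3 i hpre hge =>
    rw [pvScanB, dif_neg hge]

theorem pvScanB_depth_pos (s : List Char) (i d start : Nat) (acc : List (List Char)) (hd : 1 ≤ d) :
    pvScanB s i d start acc =
      (let r := pvBraceLoop s i d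
       if r.2 = 0 then
         pvScanB s r.1 0 start
           (acc ++ [PySem.List.slice s (some (start : Int)) (some ((r.1 - 1 : Nat) : Int))])
       else acc) := by
  fun_induction pvBraceLoop s i d with
  | case1 pos cnt h ih =>
    rw [pvScanB]
    simp only [dif_pos h.1, if_neg (show ¬ cnt = 0 by omega)]
    by_cases hc1 : s[pos]'h.1 = '{'
    · simp only [if_pos hc1, dif_pos hc1] at ih ⊢
      exact ih (by omega)
    · simp only [if_neg hc1, dif_neg hc1] at ih ⊢
      by_cases hc2 : s[pos]'h.1 = '}'
      · simp only [if_pos hc2, dif_pos hc2] at ih ⊢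
        by_cases hcnt : cnt = 1
        · subst hcnt
          simp only []
          conv_rhs => rw [pvBraceLoop]
          rw [dif_neg (show ¬ ((pos + 1) < s.length ∧ 0 < 1 - 1) by omega)]
          simp
        · simp only [if_neg hcnt]
          exact ih (by omega)
      · simp only [if_neg hc2, dif_neg hc2] at ih ⊢
        exact ih hd
  | case2 pos cnt h =>
    rw [pvScanB]
    have hpos : ¬ pos < s.length := by
      intro hc
      exact h ⟨hc, by omega⟩
    rw [dif_neg hpos]
    simp only []
    rw [if_neg (show ¬ cnt = 0 by omega)]

theorem pvLoopA_eq_scanB_aux (n : Nat) : ∀ (s : List Char) (i : Nat), i ≤ s.length → s.length - i ≤ n →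
    ∀ (start : Nat) (acc : List (List Char)), pvLoopA s i acc = pvScanB s i 0 start acc := by
  induction n with
  | zero =>
    intro s i hi hn start acc
    have hie : i = s.length := by omega
    have hF : pvFirst s i = none := by
      cases hF : pvFirst s i with
      | none => rfl
      | some j =>
        obtain ⟨hij, hpre, -⟩ := pvFirst_spec_some s i j hF
        have h7 : pvMarker.length ≤ (s.drop j).length := hpre.length_le
        have hm : pvMarker.length = 7 := rfl
        simp only [List.length_drop] at h7
        omega
    rw [pvLoopA]
    simp only [pvFindFrom_eq_first s i hi, hF]
    rw [pvScanB_depth0, hF]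
    simp
  | succ n ih =>
    intro s i hi hn start acc
    rw [pvLoopA]
    simp only [pvFindFrom_eq_first s i hi]
    cases hF : pvFirst s i with
    | none =>
      rw [pvScanB_depth0, hF]
      simp
    | some j =>
      obtain ⟨hij, hpre, -⟩ := pvFirst_spec_some s i j hF
      have h7 : pvMarker.length ≤ (s.drop j).length := hpre.length_le
      have hm : pvMarker.length = 7 := rfl
      simp only [List.length_drop] at h7
      rw [dif_neg (show ¬ ((j : Int) = -1) by omega)]
      simp only [Int.toNat_natCast]
      rw [pvScanB_depth0, hF]
      change _ = pvScanB s (j + 7) 1 (j + 7) acc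
      rw [pvScanB_depth_pos s (j + 7) 1 (j + 7) acc le_rfl]
      simp only []
      by_cases hr : (pvBraceLoop s (j + 7) 1).2 = 0
      · rw [if_pos hr, if_pos hr]
        have hge := pvBraceLoop_ge s (j + 7) 1
        have hle := pvBraceLoop_le s (j + 7) 1 (by omega)
        exact ih s (pvBraceLoop s (j + 7) 1).1 hle (by omega) (j + 7) _
      · rw [if_neg hr, if_neg hr]

theorem pvLoopA_eq_scanB (s : List Char) (i : Nat) (hi : i ≤ s.length)
    (start : Nat) (acc : List (List Char)) :
    pvLoopA s i acc = pvScanB s i 0 start acc := by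
  exact pvLoopA_eq_scanB_aux (s.length - i) s i hi le_rfl start acc

-- ===== VERDICT (by name: the statement is the Claim_ definition above) =====
theorem parse_boxed_spec : Claim_equal_parse_boxed := by
  intro text reverse _
  unfold Spec_parse_boxed parse_boxed parse_boxed_alt
  rw [pvLoopA_eq_scanB text.toList 0 (Nat.zero_le _) 0 []]
  cases reverse <;> rfl
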